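-- pv_equiv track=rewrite | github.com/netra-systems/zen | scripts/auto_split_files.py | _group_functions_by_pattern
-- ===== SOURCE A (Python) =====
-- from typing import Any, Dict, List, Optional, Tuple
--
-- def _group_functions_by_pattern(functions: List[Dict]) -> Dict[str, List[Dict]]:
--     """Group functions by naming patterns."""
--     groups = {}
--
--     for func in functions:
--         name = func['name']
--
--         # Group by common prefixes
--         if name.startswith('_'):
--             group = 'private'
--         elif name.startswith('test_'):
--             group = 'tests'
--         elif name.startswith('get_'):
--             group = 'getters'
--         elif name.startswith('set_'):
--             group = 'setters'
--         elif name.startswith('create_'):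
--             group = 'creators'
--         elif name.startswith('update_'):
--             group = 'updaters'
--         elif name.startswith('delete_'):
--             group = 'deleters'
--         else:
--             group = 'main'
--
--         if group not in groups:
--             groups[group] = []
--         groups[group].append(func)
--
--     return groups
-- ===== SOURCE B (Python) =====
-- from typing import Any, Dict, List, Optional, Tuple
--
-- def _bucket(name):
--     if name.startswith('_'): return 'private'
--     if name.startswith('test_'): return 'tests'
--     if name.startswith('get_'): return 'getters'
--     if name.startswith('set_'): return 'setters'
--     if name.startswith('create_'): return 'creators'
--     if name.startswith('update_'): return 'updaters'
--     if name.startswith('delete_'): return 'deleters'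
--     return 'main'
--
-- def _group_functions_by_pattern(functions: List[Dict]) -> Dict[str, List[Dict]]:
--     """Group functions by naming patterns, built in stages: label every function,
--     dedup the labels in first-occurrence order, then build each bucket wholesale."""
--     labels = [_bucket(f['name']) for f in functions]
--     order = dict.fromkeys(labels)  # first-occurrence order of the buckets
--     return {g: [f for f, l in zip(functions, labels) if l == g] for g in order}
-- ===== Notes on version B (the rewrite author's own statement) =====
-- stated objective: alternative
-- what changed: A's single pass that grows per-bucket lists inside a dict (create-if-missing, then append) is replaced by a staged construction: one labeling pass, an ordered dedup of the labels (dict.fromkeys), then a dict comprehension that builds each bucket wholesale by filtering the zipped (function, label) pairs.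
import Mathlib
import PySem

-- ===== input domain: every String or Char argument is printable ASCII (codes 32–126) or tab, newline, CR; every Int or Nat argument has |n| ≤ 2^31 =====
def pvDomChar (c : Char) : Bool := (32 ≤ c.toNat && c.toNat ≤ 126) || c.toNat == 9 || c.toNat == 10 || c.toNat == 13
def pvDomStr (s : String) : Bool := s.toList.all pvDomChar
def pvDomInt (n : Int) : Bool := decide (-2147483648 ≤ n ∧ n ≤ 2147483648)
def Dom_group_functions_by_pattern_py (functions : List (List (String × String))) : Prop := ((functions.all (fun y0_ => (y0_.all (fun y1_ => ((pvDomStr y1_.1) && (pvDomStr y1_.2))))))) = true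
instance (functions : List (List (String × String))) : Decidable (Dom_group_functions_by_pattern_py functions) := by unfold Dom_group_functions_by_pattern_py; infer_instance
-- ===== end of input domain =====

-- B replaces A's single-pass dict-of-appends by a staged construction: a labeling pass,
-- an ordered dedup of the labels, then each bucket built wholesale by filtering (alternative; same cost class).
-- ===== PORT A =====
def group_functions_by_pattern_py (functions : List (List (String × String))) : List (String × List (List (String × String))) :=
  (functions.foldl (fun groups func =>
    match (PySem.Dict.mk func).get? "name" with
    | none => groups   -- KeyError in Python; excluded by Pre_
    | some name =>
      let group :=
        if PySem.Str.startswith name "_" then "private"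
        else if PySem.Str.startswith name "test_" then "tests"
        else if PySem.Str.startswith name "get_" then "getters"
        else if PySem.Str.startswith name "set_" then "setters"
        else if PySem.Str.startswith name "create_" then "creators"
        else if PySem.Str.startswith name "update_" then "updaters"
        else if PySem.Str.startswith name "delete_" then "deleters"
        else "main"
      let groups := if groups.contains group then groups else groups.insert group ([] : List (List (String × String)))
      groups.modify group [] (fun l => l ++ [func])
  ) PySem.Dict.empty).items

-- ===== PORT B =====
def pvBucket (name : String) : String :=
  if PySem.Str.startswith name "_" then "private"
  else if PySem.Str.startswith name "test_" then "tests"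
  else if PySem.Str.startswith name "get_" then "getters"
  else if PySem.Str.startswith name "set_" then "setters"
  else if PySem.Str.startswith name "create_" then "creators"
  else if PySem.Str.startswith name "update_" then "updaters"
  else if PySem.Str.startswith name "delete_" then "deleters"
  else "main"

def group_functions_by_pattern_py_alt (functions : List (List (String × String))) : List (String × List (List (String × String))) :=
  let labels := functions.map (fun f =>
    match (PySem.Dict.mk f).get? "name" with
    | none => ""   -- KeyError in Python; excluded by Pre_
    | some n => pvBucket n)
  let order := PySem.List.dedup labels   -- dict.fromkeys: first-occurrence dedup
  -- the dict comprehension over the distinct keys of 'order': its items are exactly this map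
  order.map (fun g => (g, ((functions.zip labels).filter (fun p => p.2 == g)).map Prod.fst))

-- ===== PRECONDITION & SPEC =====
-- Pre_ excludes only inputs where some function dict lacks a 'name' key: there A (and B) raise KeyError.
def Pre_group_functions_by_pattern_py (functions : List (List (String × String))) : Prop :=
  ∀ func ∈ functions, func.any (fun p => p.1 == "name") = true
instance (functions : List (List (String × String))) : Decidable (Pre_group_functions_by_pattern_py functions) := by unfold Pre_group_functions_by_pattern_py; infer_instance

def pvWitness_group_functions_by_pattern_py : (List (List (String × String))) :=
  [[("name", "get_x")], [("name", "run"), ("doc", "d")]]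

def Spec_group_functions_by_pattern_py (functions : List (List (String × String))) (out : List (String × List (List (String × String)))) : Prop := out = group_functions_by_pattern_py_alt functions
instance (functions : List (List (String × String))) (out : List (String × List (List (String × String)))) : Decidable (Spec_group_functions_by_pattern_py functions out) := by unfold Spec_group_functions_by_pattern_py; infer_instance

-- ===== CLAIM (what is proved, stated in full; the proofs are below) =====
def Claim_equal_group_functions_by_pattern_py : Prop := ∀ (functions : List (List (String × String))), Dom_group_functions_by_pattern_py functions → Pre_group_functions_by_pattern_py functions → Spec_group_functions_by_pattern_py functions (group_functions_by_pattern_py functions)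

-- ===== LEMMAS AND PROOFS =====

-- The label of one function record (proof-side name for the classifier both ports apply).
def pvLabel (f : List (String × String)) : String :=
  match (PySem.Dict.mk f).get? "name" with
  | none => ""
  | some n => pvBucket n

-- A's "create the bucket if missing, then append" is a single Dict.modify.
theorem pv_modify_guard (d : PySem.Dict String (List (List (String × String)))) (g : String)
    (v : List (String × String)) :
    (if d.contains g then d else d.insert g []).modify g [] (fun l => l ++ [v]) =
      d.modify g [] (fun l => l ++ [v]) := by
  by_cases hc : d.contains g = true
  · simp [hc]
  · simp only [Bool.not_eq_true] at hc
    simp [hc, PySem.Dict.modify, PySem.Dict.getD_insert_self,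
      PySem.Dict.getD_of_not_contains _ _ hc, PySem.Dict.insert_insert_self]

-- A's fold, rewritten as a pure modify-loop keyed by pvLabel (uses Pre_ for the 'name' lookup).
theorem pv_A_fold (functions : List (List (String × String)))
    (hpre : Pre_group_functions_by_pattern_py functions) :
    group_functions_by_pattern_py functions =
      (functions.foldl (fun d f => d.modify (pvLabel f) [] (fun l => l ++ [f]))
        PySem.Dict.empty).items := by
  unfold group_functions_by_pattern_py
  congr 1
  apply PySem.List.foldl_congr_mem
  intro acc f hf
  have hany := hpre f hf
  cases h : (PySem.Dict.mk f).get? "name" with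
  | none =>
    exfalso
    have hc : (PySem.Dict.mk f).contains "name" = true := by
      simp [PySem.Dict.contains_mk, hany]
    rw [PySem.Dict.contains_eq_isSome_get?, h] at hc
    simp at hc
  | some n =>
    simp only [pvLabel, h]
    exact pv_modify_guard acc _ f

-- The value the modify-loop leaves at key g: all functions labeled g, in order.
theorem pv_A_getD (functions : List (List (String × String))) (g : String) :
    (functions.foldl (fun d f => d.modify (pvLabel f) [] (fun l => l ++ [f]))
        PySem.Dict.empty).getD g [] =
      functions.filter (fun f => pvLabel f == g) := by
  have h := PySem.Dict.getD_foldl_modify_append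
    (functions.map (fun f => (pvLabel f, f))) PySem.Dict.empty g
  rw [List.foldl_map] at h
  simpa [PySem.Dict.getD_empty, List.filter_map, Function.comp_def] using h

-- A's result in closed form.
theorem pv_A_items (functions : List (List (String × String)))
    (hpre : Pre_group_functions_by_pattern_py functions) :
    group_functions_by_pattern_py functions =
      (PySem.Set.ofList (functions.map pvLabel)).map
        (fun g => (g, functions.filter (fun f => pvLabel f == g))) := by
  rw [pv_A_fold functions hpre]
  have hnd : (functions.foldl (fun d f => d.modify (pvLabel f) [] (fun l => l ++ [f]))
      PySem.Dict.empty).keys.Nodup := by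
    exact PySem.Dict.nodup_keys_foldl_modify_key functions pvLabel []
      (fun _ f l => l ++ [f]) PySem.Dict.empty (by simp [PySem.Dict.keys_empty])
  rw [PySem.Dict.items_eq_map_keys _ hnd []]
  rw [PySem.Dict.keys_foldl_modify_key functions pvLabel [] (fun _ f l => l ++ [f])
      PySem.Dict.empty]
  have hkeys : PySem.Set.update (PySem.Dict.empty :
      PySem.Dict String (List (List (String × String)))).keys (functions.map pvLabel) =
      PySem.Set.ofList (functions.map pvLabel) := rfl
  rw [hkeys]
  exact List.map_congr_left (fun g _ => by rw [pv_A_getD])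

-- B's result reduces to the same closed form.
theorem pv_B_items (functions : List (List (String × String))) :
    group_functions_by_pattern_py_alt functions =
      (PySem.Set.ofList (functions.map pvLabel)).map
        (fun g => (g, functions.filter (fun f => pvLabel f == g))) := by
  have hlab : (fun f : List (String × String) =>
      match (PySem.Dict.mk f).get? "name" with
      | none => ""
      | some n => pvBucket n) = pvLabel := by
    funext f; rfl
  have hzip : functions.zip (functions.map pvLabel) =
      functions.map (fun f => (f, pvLabel f)) := by
    induction functions with
    | nil => rfl
    | cons f fs ih => simp [ih]
  simp only [group_functions_by_pattern_py_alt, hlab, PySem.List.dedup, hzip]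
  apply List.map_congr_left
  intro g _
  simp [List.filter_map, Function.comp_def]

-- ===== VERDICT (by name: the statement is the Claim_ definition above) =====
theorem group_functions_by_pattern_py_spec : Claim_equal_group_functions_by_pattern_py := by
  intro functions _ hpre
  unfold Spec_group_functions_by_pattern_py
  rw [pv_A_items functions hpre, pv_B_items]
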